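-- pv_equiv track=rewrite | github.com/shaneholloman/phoenix | packages/phoenix-client/src/phoenix/client/helpers/atif/_convert.py | _split_into_turns
-- ===== SOURCE A (Python) =====
-- from typing import Any, Dict, List, Mapping, Optional, Sequence, Union
--
-- def _split_into_turns(
--     steps: Sequence[Mapping[str, Any]],
-- ) -> List[List[int]]:
--     """Split step indices into turns based on user messages.
--
--     The first turn includes all steps from the beginning through the
--     agent/system steps that follow the first user message, up to (but
--     not including) the next user message. Each subsequent user message
--     starts a new turn. This means leading system/context steps before
--     the first user message are grouped into the first turn rather than
--     creating an empty turn.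
--
--     Returns a list of lists of step indices.
--     """
--     turns: List[List[int]] = []
--     current: List[int] = []
--     seen_first_user = False
--     for i, step in enumerate(steps):
--         if step.get("source") == "user":
--             if seen_first_user and current:
--                 turns.append(current)
--                 current = []
--             seen_first_user = True
--         current.append(i)
--     if current:
--         turns.append(current)
--     return turns
-- ===== SOURCE B (Python) =====
-- from typing import Any, List, Mapping, Sequence
--
--
-- def _split_into_turns(
--     steps: Sequence[Mapping[str, Any]],
-- ) -> List[List[int]]:
--     """Split step indices into turns based on user messages.
--
--     Builds the table of user-message positions once; every user position
--     after the first one is a cut point, and the turns are the slices of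
--     the index range [0, n) between consecutive cut points.
--     """
--     n = len(steps)
--     if n == 0:
--         return []
--     user_idx = [i for i, step in enumerate(steps) if step.get("source") == "user"]
--     cuts = user_idx[1:]
--     starts = [0] + cuts
--     ends = cuts + [n]
--     return [list(range(s, e)) for s, e in zip(starts, ends)]
-- ===== Notes on version B (the rewrite author's own statement) =====
-- stated objective: alternative
-- what changed: Replaces A's stateful accumulator loop (current turn, seen-first-user flag) with a precomputed table of user-message positions whose tail gives the cut points, from which the index ranges are sliced recursively.
import Mathlib
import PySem

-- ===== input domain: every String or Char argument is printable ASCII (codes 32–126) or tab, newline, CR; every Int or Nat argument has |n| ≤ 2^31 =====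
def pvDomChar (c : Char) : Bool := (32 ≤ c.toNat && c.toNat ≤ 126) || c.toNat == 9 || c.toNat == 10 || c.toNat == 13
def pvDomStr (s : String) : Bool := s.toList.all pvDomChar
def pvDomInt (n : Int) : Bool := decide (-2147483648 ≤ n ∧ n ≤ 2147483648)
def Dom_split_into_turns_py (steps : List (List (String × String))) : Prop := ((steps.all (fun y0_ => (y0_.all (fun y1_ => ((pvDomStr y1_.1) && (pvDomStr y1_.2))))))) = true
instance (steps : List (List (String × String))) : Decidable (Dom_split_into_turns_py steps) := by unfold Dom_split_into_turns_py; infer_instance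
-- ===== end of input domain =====

-- B replaces A's stateful accumulator loop by a precomputed user-position table sliced recursively; alternative decomposition, same cost.


-- shared helper: step.get("source") == "user" (dict = association list, first-match lookup)
def isUserStep (step : List (String × String)) : Bool :=
  (PySem.Dict.mk step).get? "source" == some "user"

-- ===== PORT A =====
-- one iteration of A's loop body over state (turns, current, seen_first_user)
def stepA (st : List (List Int) × List Int × Bool) (p : Int × List (String × String)) :
    List (List Int) × List Int × Bool :=
  let (turns, current, seen) := st
  if isUserStep p.2 then
    if seen && !current.isEmpty then (turns ++ [current], [p.1], true)
    else (turns, current ++ [p.1], true)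
  else (turns, current ++ [p.1], seen)

def split_into_turns_py (steps : List (List (String × String))) : List (List Int) :=
  let r := (PySem.List.enumerate steps).foldl stepA ([], [], false)
  if !r.2.1.isEmpty then r.1 ++ [r.2.1] else r.1

-- ===== PORT B =====
def split_into_turns_py_alt (steps : List (List (String × String))) : List (List Int) :=
  let n : Int := steps.length
  if steps.length = 0 then []
  else
    let userIdx := ((PySem.List.enumerate steps).filter (fun p => isUserStep p.2)).map (·.1)
    let cuts := PySem.List.slice userIdx (some 1) none   -- user_idx[1:]
    let starts := 0 :: cuts
    let ends := cuts ++ [n]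
    (starts.zip ends).map (fun p => PySem.List.pyRange p.1 p.2 1)

-- ===== PRECONDITION & SPEC =====
def Spec_split_into_turns_py (steps : List (List (String × String))) (out : List (List Int)) : Prop := out = split_into_turns_py_alt steps
instance (steps : List (List (String × String))) (out : List (List Int)) : Decidable (Spec_split_into_turns_py steps out) := by unfold Spec_split_into_turns_py; infer_instance

-- ===== CLAIM (what is proved, stated in full; the proofs are below) =====
def Claim_equal_split_into_turns_py : Prop := ∀ (steps : List (List (String × String))), Dom_split_into_turns_py steps → Spec_split_into_turns_py steps (split_into_turns_py steps)

-- ===== LEMMAS AND PROOFS =====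

-- proof-only helpers
def userIdxOf (steps : List (List (String × String))) : List Int :=
  ((PySem.List.enumerate steps).filter (fun p => isUserStep p.2)).map (·.1)

def cutsOf (steps : List (List (String × String))) : List Int :=
  (userIdxOf steps).tail

def lastOf (s : Int) : List Int → Int
  | [] => s
  | c :: r => lastOf c r

def initChunks (s : Int) : List Int → List (List Int)
  | [] => []
  | c :: r => PySem.List.pyRange s c 1 :: initChunks c r

theorem lastOf_snoc (s c : Int) (cs : List Int) : lastOf s (cs ++ [c]) = c := by
  induction cs generalizing s with
  | nil => rfl
  | cons a t ih => simpa [lastOf] using ih a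

theorem initChunks_snoc (s c : Int) (cs : List Int) :
    initChunks s (cs ++ [c]) = initChunks s cs ++ [PySem.List.pyRange (lastOf s cs) c 1] := by
  induction cs generalizing s with
  | nil => rfl
  | cons a t ih => simp [initChunks, lastOf, ih a]

theorem zipChunks_eq (n s : Int) (cs : List Int) :
    ((s :: cs).zip (cs ++ [n])).map (fun p => PySem.List.pyRange p.1 p.2 1) =
      initChunks s cs ++ [PySem.List.pyRange (lastOf s cs) n 1] := by
  induction cs generalizing s with
  | nil => rfl
  | cons a t ih =>
    have h := ih a
    simp only [List.zip] at h ⊢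
    simp [initChunks, lastOf, h]

theorem lastOf_cases (s : Int) (cs : List Int) : lastOf s cs = s ∨ lastOf s cs ∈ cs := by
  induction cs generalizing s with
  | nil => exact Or.inl rfl
  | cons a t ih =>
    rcases ih a with h | h
    · exact Or.inr (by simp [lastOf, h])
    · exact Or.inr (by simp [lastOf, h])

theorem mem_userIdxOf (steps : List (List (String × String))) (i : Int)
    (h : i ∈ userIdxOf steps) : 0 ≤ i ∧ i < (steps.length : Int) := by
  unfold userIdxOf at h
  simp only [List.mem_map, List.mem_filter] at h
  obtain ⟨p, ⟨hp, _⟩, rfl⟩ := h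
  rw [PySem.List.mem_enumerate_iff] at hp
  obtain ⟨k, hk, rfl⟩ := hp
  constructor <;> simp <;> omega

theorem lastOf_bounds (steps : List (List (String × String))) :
    0 ≤ lastOf 0 (cutsOf steps) ∧ (steps ≠ [] → lastOf 0 (cutsOf steps) < (steps.length : Int)) := by
  rcases lastOf_cases 0 (cutsOf steps) with h | h
  · rw [h]
    refine ⟨le_refl _, fun hne => ?_⟩
    have : 0 < steps.length := List.length_pos_iff.mpr hne
    exact_mod_cast this
  · have hmem : lastOf 0 (cutsOf steps) ∈ userIdxOf steps := List.mem_of_mem_tail h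
    have := mem_userIdxOf steps _ hmem
    exact ⟨this.1, fun _ => this.2⟩

theorem userIdxOf_snoc (steps : List (List (String × String))) (b : List (String × String)) :
    userIdxOf (steps ++ [b]) =
      userIdxOf steps ++ (if isUserStep b then [(steps.length : Int)] else []) := by
  unfold userIdxOf
  rw [PySem.List.enumerate_append, List.filter_append, List.map_append]
  congr 1
  by_cases hu : isUserStep b <;> simp [PySem.List.enumerate, hu]

theorem userIdxOf_ne_nil_of_mem (steps : List (List (String × String))) :
    (userIdxOf steps ≠ []) → steps ≠ [] := by
  intro h hn
  subst hn
  simp [userIdxOf, PySem.List.enumerate] at h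

-- the loop invariant: A's fold state, characterised by B's cut table
theorem foldA_eq (steps : List (List (String × String))) :
    (PySem.List.enumerate steps).foldl stepA ([], [], false) =
      (initChunks 0 (cutsOf steps),
       PySem.List.pyRange (lastOf 0 (cutsOf steps)) (steps.length : Int) 1,
       !(userIdxOf steps).isEmpty) := by
  induction steps using List.reverseRecOn with
  | nil => simp [PySem.List.enumerate, cutsOf, userIdxOf, initChunks, lastOf,
      PySem.List.pyRange_zero]
  | append_singleton xs b ih =>
    rw [PySem.List.enumerate_append, List.foldl_append, ih]
    have hsnoc := userIdxOf_snoc xs b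
    have hb := lastOf_bounds xs
    simp only [PySem.List.enumerate, PySem.List.enumerate_nil, zero_add,
      List.foldl_cons, List.foldl_nil]
    by_cases hu : isUserStep b
    · by_cases he : userIdxOf xs = []
      · -- first user message ever: no cut, current extended
        have hcut : cutsOf (xs ++ [b]) = [] := by
          simp [cutsOf, hsnoc, he, hu]
        have hcut0 : cutsOf xs = [] := by simp [cutsOf, he]
        have hne : !(userIdxOf xs).isEmpty = false := by simp [he]
        simp only [stepA, hu, hne, if_true, Bool.false_and, if_false,
          hcut, hcut0, initChunks, lastOf, hsnoc, he, Prod.mk.injEq]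
        rw [hcut0] at *
        simp only [lastOf, List.length_append, List.length_cons, List.length_nil]
        push_cast
        rw [PySem.List.pyRange_one_succ_right (by exact_mod_cast Nat.zero_le _)]
        simp
      · -- later user message: cut here
        have hne : xs ≠ [] := userIdxOf_ne_nil_of_mem xs he
        have hlt : lastOf 0 (cutsOf xs) < (xs.length : Int) := hb.2 hne
        have hcur : (PySem.List.pyRange (lastOf 0 (cutsOf xs)) (xs.length : Int) 1).isEmpty = false := by
          rw [PySem.List.pyRange_one_cons hlt]; rfl
        have hcut : cutsOf (xs ++ [b]) = cutsOf xs ++ [(xs.length : Int)] := by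
          rcases List.exists_cons_of_ne_nil he with ⟨a, t, hat⟩
          simp [cutsOf, hsnoc, hu, hat]
        have hne' : !(userIdxOf xs).isEmpty = true := by
          simp [List.isEmpty_iff, he]
        simp only [stepA, hu, hne', hcur, Bool.not_false, Bool.and_true, if_true,
          hcut, initChunks_snoc, lastOf_snoc, hsnoc, Prod.mk.injEq]
        simp only [List.length_append, List.length_cons, List.length_nil]
        push_cast
        rw [PySem.List.pyRange_one_singleton]
        simp [List.isEmpty_iff, he]
    · -- non-user step: current extended, cuts unchanged
      have hcut : cutsOf (xs ++ [b]) = cutsOf xs := by simp [cutsOf, hsnoc, hu]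
      have hle : lastOf 0 (cutsOf xs) ≤ (xs.length : Int) := by
        rcases List.eq_nil_or_concat xs with h | ⟨l, a, rfl⟩
        · subst h
          simp [cutsOf, userIdxOf, PySem.List.enumerate, lastOf]
        · exact le_of_lt (hb.2 (by simp))
      simp only [stepA, hu, Bool.false_eq_true, if_false, hcut, hsnoc, Prod.mk.injEq]
      simp only [List.length_append, List.length_cons, List.length_nil]
      push_cast
      rw [PySem.List.pyRange_one_succ_right hle]
      simp

-- ===== VERDICT (by name: the statement is the Claim_ definition above) =====
theorem split_into_turns_py_spec : Claim_equal_split_into_turns_py := by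
  intro steps _
  unfold Spec_split_into_turns_py split_into_turns_py split_into_turns_py_alt
  rw [foldA_eq]
  by_cases h : steps = []
  · subst h
    simp [cutsOf, userIdxOf, PySem.List.enumerate, lastOf, initChunks, PySem.List.pyRange_zero]
  · have hlt : lastOf 0 (cutsOf steps) < (steps.length : Int) := (lastOf_bounds steps).2 h
    have hcur : (PySem.List.pyRange (lastOf 0 (cutsOf steps)) (steps.length : Int) 1).isEmpty = false := by
      rw [PySem.List.pyRange_one_cons hlt]; rfl
    have hlen : steps.length ≠ 0 := by simpa [List.length_eq_zero_iff] using h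
    simp only [hcur, Bool.not_false, if_true, if_neg hlen]
    rw [PySem.List.slice_from_one, zipChunks_eq]
    rfl
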